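-- pv_equiv track=rewrite | github.com/anorbert-cmyk/autocognitix-landing | scripts/scrapers/autobazar_parser.py | _is_listing_dict
-- ===== SOURCE A (Python) =====
-- def _is_listing_dict(d: dict) -> bool:
--     """Check if a dict looks like a car listing (has price-like and year-like keys)."""
--     keys_lower = {k.lower() for k in d.keys()}
--     has_price = any(
--         kw in keys_lower
--         for kw in ("price", "pricecurrent", "price_eur", "pricewithvat", "cena")
--     )
--     has_vehicle = any(
--         kw in keys_lower
--         for kw in ("year", "yearvalue", "mileage", "fuelvalue", "fuel", "brand", "make", "model")
--     )
--     return has_price and has_vehicle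
-- ===== SOURCE B (Python) =====
-- # B: classify each key once through a single keyword->category map, shrinking the set of
-- # still-needed categories, stopping early once it is empty.
-- KEYWORD_CLASS = {
--     "price": 0, "pricecurrent": 0, "price_eur": 0, "pricewithvat": 0, "cena": 0,
--     "year": 1, "yearvalue": 1, "mileage": 1, "fuelvalue": 1, "fuel": 1,
--     "brand": 1, "make": 1, "model": 1,
-- }
--
-- def _is_listing_dict(d: dict) -> bool:
--     need = {0, 1}
--     for k in d.keys():
--         if not need:
--             break
--         need.discard(KEYWORD_CLASS.get(k.lower()))
--     return not need
-- ===== Notes on version B (the rewrite author's own statement) =====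
-- stated objective: alternative
-- what changed: A builds a lowered-key set and scans two keyword tuples against it; B classifies each key once through a single keyword->category map and makes one pass over the keys shrinking a set of still-needed categories, breaking early once it is empty.
import Mathlib
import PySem

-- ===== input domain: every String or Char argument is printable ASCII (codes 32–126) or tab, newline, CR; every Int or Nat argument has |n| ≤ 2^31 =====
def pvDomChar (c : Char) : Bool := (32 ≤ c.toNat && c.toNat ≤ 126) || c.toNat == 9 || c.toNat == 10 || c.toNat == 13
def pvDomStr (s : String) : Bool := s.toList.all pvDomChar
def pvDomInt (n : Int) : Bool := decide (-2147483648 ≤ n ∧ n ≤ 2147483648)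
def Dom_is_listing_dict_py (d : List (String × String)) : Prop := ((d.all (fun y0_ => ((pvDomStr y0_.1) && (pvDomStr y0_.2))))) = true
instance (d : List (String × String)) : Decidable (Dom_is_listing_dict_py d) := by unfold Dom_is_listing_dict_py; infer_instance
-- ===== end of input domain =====

-- B replaces A's lowered-key set + two keyword scans by one keyword->category map and a single
-- pass over the keys shrinking a set of still-needed categories, with an early break (alternative decomposition).

-- ===== PORT A =====
-- keys_lower = {k.lower() for k in d.keys()}
-- has_price = any(kw in keys_lower for kw in (...)); has_vehicle = any(...); return has_price and has_vehicle
def is_listing_dict_py (d : List (String × String)) : Bool :=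
  let keysLower : PySem.Set String :=
    PySem.Set.ofList ((d.map (fun p => p.1)).map (fun k => PySem.Str.lower k))
  let hasPrice :=
    ["price", "pricecurrent", "price_eur", "pricewithvat", "cena"].any
      (fun kw => PySem.Set.contains keysLower kw)
  let hasVehicle :=
    ["year", "yearvalue", "mileage", "fuelvalue", "fuel", "brand", "make", "model"].any
      (fun kw => PySem.Set.contains keysLower kw)
  hasPrice && hasVehicle

-- ===== PORT B =====
-- KEYWORD_CLASS = {"price": 0, ..., "model": 1}
def pvKWCLASS : PySem.Dict String Int :=
  PySem.Dict.ofList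
    [("price", 0), ("pricecurrent", 0), ("price_eur", 0), ("pricewithvat", 0), ("cena", 0),
     ("year", 1), ("yearvalue", 1), ("mileage", 1), ("fuelvalue", 1), ("fuel", 1),
     ("brand", 1), ("make", 1), ("model", 1)]

-- for k in d.keys(): if not need: break; need.discard(KEYWORD_CLASS.get(k.lower()));  return not need
def pvGo : List String → PySem.Set (Option Int) → Bool
  | [], need => PySem.Set.len need == 0
  | k :: ks, need =>
      if PySem.Set.len need == 0 then true
      else pvGo ks (PySem.Set.discard need (PySem.Dict.get? pvKWCLASS (PySem.Str.lower k)))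

def is_listing_dict_py_alt (d : List (String × String)) : Bool :=
  pvGo (d.map (fun p => p.1)) (PySem.Set.ofList [some 0, some 1])

-- ===== PRECONDITION & SPEC =====
def Spec_is_listing_dict_py (d : List (String × String)) (out : Bool) : Prop := out = is_listing_dict_py_alt d
instance (d : List (String × String)) (out : Bool) : Decidable (Spec_is_listing_dict_py d out) := by unfold Spec_is_listing_dict_py; infer_instance

-- ===== CLAIM (what is proved, stated in full; the proofs are below) =====
def Claim_equal_is_listing_dict_py : Prop := ∀ (d : List (String × String)), Dom_is_listing_dict_py d → Spec_is_listing_dict_py d (is_listing_dict_py d)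

-- ===== LEMMAS AND PROOFS =====

-- pvGo succeeds iff every still-needed category is hit by some key
theorem pvGo_spec (ks : List String) (need : PySem.Set (Option Int)) :
    pvGo ks need
      = need.all (fun c => ks.any
          (fun k => PySem.Dict.get? pvKWCLASS (PySem.Str.lower k) == c)) := by
  induction ks generalizing need with
  | nil =>
    cases need with
    | nil => simp [pvGo]
    | cons c cs => simp [pvGo, PySem.Set.len]; omega
  | cons k ks ih =>
    cases need with
    | nil => simp [pvGo]
    | cons c cs =>
      rw [pvGo, if_neg (by simp [PySem.Set.len]; omega), ih]
      rw [Bool.eq_iff_iff]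
      simp only [List.all_eq_true, List.any_cons, PySem.Set.mem_discard,
        Bool.or_eq_true, beq_iff_eq]
      constructor
      · intro h x hx
        by_cases he : PySem.Dict.get? pvKWCLASS (PySem.Str.lower k) = x
        · exact Or.inl he
        · exact Or.inr (h x ⟨hx, fun hmem => he hmem.symm⟩)
      · rintro h x ⟨hx, hne⟩
        rcases h x hx with he | hany
        · exact absurd he.symm hne
        · exact hany

-- classification through the map agrees with membership in the two keyword groups
-- first-match assoc lookup as an any-scan (distinct keys); specific to B's literal map
theorem pv_get?_any (l : List (String × Int)) (s : String) (v : Int)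
    (hl : (l.map Prod.fst).Nodup) :
    (PySem.Dict.get? (PySem.Dict.mk l) s == some v)
      = l.any (fun p => p.1 == s && p.2 == v) := by
  induction l with
  | nil => simp [show PySem.Dict.get? (PySem.Dict.mk ([] : List (String × Int))) s = none from rfl]
  | cons p rest ih =>
    obtain ⟨k, w⟩ := p
    simp only [List.map_cons, List.nodup_cons] at hl
    rw [PySem.Dict.get?_mk_cons, List.any_cons]
    by_cases hk : k = s
    · subst hk
      have hrest : rest.any (fun p => p.1 == k && p.2 == v) = false := by
        rw [List.any_eq_false]
        rintro ⟨k', w'⟩ hmem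
        simp only [Bool.and_eq_true, beq_iff_eq, not_and]
        intro hk'
        exact absurd (hk' ▸ List.mem_map_of_mem hmem) hl.1
      simp [hrest]
    · have : (k == s) = false := by simp [hk]
      simp [this, ih hl.2]

theorem pv_kw_mk : pvKWCLASS = PySem.Dict.mk
    [("price", 0), ("pricecurrent", 0), ("price_eur", 0), ("pricewithvat", 0), ("cena", 0),
     ("year", 1), ("yearvalue", 1), ("mileage", 1), ("fuelvalue", 1), ("fuel", 1),
     ("brand", 1), ("make", 1), ("model", 1)] := by rfl

-- classification through the map agrees with membership in the two keyword groups
theorem pv_class_price (s : String) :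
    (PySem.Dict.get? pvKWCLASS s == some 0)
      = ["price", "pricecurrent", "price_eur", "pricewithvat", "cena"].contains s := by
  rw [pv_kw_mk, pv_get?_any _ _ _ (by decide), Bool.eq_iff_iff]
  simp [List.contains_eq_mem]
  tauto

theorem pv_class_vehicle (s : String) :
    (PySem.Dict.get? pvKWCLASS s == some 1)
      = ["year", "yearvalue", "mileage", "fuelvalue", "fuel", "brand", "make", "model"].contains s := by
  rw [pv_kw_mk, pv_get?_any _ _ _ (by decide), Bool.eq_iff_iff]
  simp [List.contains_eq_mem]
  tauto

-- A's 'kw in set(lowered keys)' scans equal B's per-key scans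
theorem pv_any_comm (ks kws : List String) :
    kws.any (fun kw =>
        PySem.Set.contains (PySem.Set.ofList (ks.map (fun k => PySem.Str.lower k))) kw)
    = ks.any (fun k => kws.contains (PySem.Str.lower k)) := by
  rw [Bool.eq_iff_iff]
  simp only [List.any_eq_true, PySem.Set.contains, List.contains_eq_mem,
    PySem.Set.mem_ofList, List.mem_map, decide_eq_true_eq]
  constructor
  · rintro ⟨kw, hkw, k, hk, rfl⟩; exact ⟨k, hk, hkw⟩
  · rintro ⟨k, hk, hkw⟩; exact ⟨_, hkw, k, hk, rfl⟩

-- ===== VERDICT (by name: the statement is the Claim_ definition above) =====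
theorem is_listing_dict_py_spec : Claim_equal_is_listing_dict_py := by
  intro d _
  show is_listing_dict_py d = is_listing_dict_py_alt d
  simp only [is_listing_dict_py, is_listing_dict_py_alt, pvGo_spec]
  have hs : PySem.Set.ofList [some (0:Int), some 1] = [some 0, some 1] := rfl
  rw [hs, pv_any_comm, pv_any_comm]
  simp only [List.all_cons, List.all_nil, Bool.and_true, pv_class_price, pv_class_vehicle]
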